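-- pv_equiv track=rewrite | github.com/tanwardivya/DSA | neetcode/arrayandhashing/top_k_frequent_elements.py | top_k_frequent_elements
-- ===== SOURCE A (Python) =====
-- from typing import List
--
-- def top_k_frequent_elements(nums:List[int], k: int)->List[int]:
--     frequency_map = {}
--     for element in nums:
--         if element in frequency_map:
--             frequency_map[element] += 1
--         else:
--             frequency_map[element] = 1
--     result = []
--     for key, val in frequency_map.items():
--         if val >= k:
--             result.append(key)
--     return result
-- ===== SOURCE B (Python) =====
-- def top_k_frequent_elements(nums, k):
--     result = []
--     remaining = nums
--     while remaining:
--         head = remaining[0]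
--         rest = [x for x in remaining[1:] if x != head]
--         if len(remaining) - len(rest) >= k:
--             result.append(head)
--         remaining = rest
--     return result
-- ===== Notes on version B (the rewrite author's own statement) =====
-- stated objective: alternative
-- what changed: B uses no frequency table at all: a whittling loop repeatedly takes the current first element, filters out all its occurrences, reads its count off the length drop, and continues on the remainder.
import Mathlib
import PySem

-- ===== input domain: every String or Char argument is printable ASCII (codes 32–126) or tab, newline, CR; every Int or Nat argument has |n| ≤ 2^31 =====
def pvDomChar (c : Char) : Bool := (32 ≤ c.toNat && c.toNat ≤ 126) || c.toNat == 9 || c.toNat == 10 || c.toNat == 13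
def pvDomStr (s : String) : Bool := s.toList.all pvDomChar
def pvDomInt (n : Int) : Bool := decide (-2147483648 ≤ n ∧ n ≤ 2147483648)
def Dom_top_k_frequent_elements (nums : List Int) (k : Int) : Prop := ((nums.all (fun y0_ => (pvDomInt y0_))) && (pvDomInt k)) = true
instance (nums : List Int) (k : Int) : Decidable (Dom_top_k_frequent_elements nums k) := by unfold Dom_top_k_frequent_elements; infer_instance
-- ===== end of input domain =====

-- B replaces A's count-table-then-filter with a recursive partition: remove all copies of the
-- head, read its count off the length drop, recurse on the remainder (alternative, same cost class).
-- ===== PORT A =====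
def top_k_frequent_elements (nums : List Int) (k : Int) : List Int :=
  let frequency_map : PySem.Dict Int Int :=
    nums.foldl (fun d element =>
      if d.contains element then d.modify element 0 (· + 1) else d.insert element 1)
      PySem.Dict.empty
  frequency_map.items.foldl (fun result p => if p.2 ≥ k then result ++ [p.1] else result) []

-- ===== PORT B =====
-- the while loop of Source B: state = (remaining, result)
def tkAltLoop (k : Int) (remaining : List Int) (result : List Int) : List Int :=
  match remaining with
  | [] => result
  | head :: tl =>
    let rest := tl.filter (fun x => x != head)
    let result' :=
      if (((head :: tl).length : Int) - (rest.length : Int)) ≥ k then result ++ [head] else result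
    tkAltLoop k rest result'
termination_by remaining.length
decreasing_by
  simpa using Nat.lt_succ_of_le (List.length_filter_le _ _)

def top_k_frequent_elements_alt (nums : List Int) (k : Int) : List Int :=
  tkAltLoop k nums []

-- ===== PRECONDITION & SPEC =====
def Spec_top_k_frequent_elements (nums : List Int) (k : Int) (out : List Int) : Prop := out = top_k_frequent_elements_alt nums k
instance (nums : List Int) (k : Int) (out : List Int) : Decidable (Spec_top_k_frequent_elements nums k out) := by unfold Spec_top_k_frequent_elements; infer_instance

-- ===== CLAIM =====
def Claim_equal_top_k_frequent_elements : Prop := ∀ (nums : List Int) (k : Int), Dom_top_k_frequent_elements nums k → Spec_top_k_frequent_elements nums k (top_k_frequent_elements nums k)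

-- ===== LEMMAS AND PROOFS =====

lemma step_eq (d : PySem.Dict Int Int) (x : Int) :
    (if d.contains x then d.modify x 0 (· + 1) else d.insert x 1) = d.modify x 0 (· + 1) := by
  by_cases h : d.contains x = true
  · simp [h]
  · simp only [h, Bool.false_eq_true, ite_false, PySem.Dict.modify,
      PySem.Dict.getD_of_not_contains (h := by simpa using h), zero_add]

lemma fm_eq (nums : List Int) :
    nums.foldl (fun d element =>
      if d.contains element then d.modify element 0 (· + 1) else d.insert element 1)
      PySem.Dict.empty = PySem.Dict.counter nums := by
  rw [PySem.Dict.counter_eq_foldl]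
  congr 1
  funext d x
  exact step_eq d x

-- A equals: filter the distinct elements (first-occurrence order) by count ≥ k.
lemma a_eq_filter (nums : List Int) (k : Int) :
    top_k_frequent_elements nums k
      = (PySem.Set.ofList nums).filter (fun x => decide ((nums.count x : Int) ≥ k)) := by
  simp only [top_k_frequent_elements, fm_eq, PySem.Dict.items_counter, List.foldl_map]
  simpa using PySem.List.foldl_append_ite_eq_filter
    (l := PySem.Set.ofList nums) (p := fun x => (nums.count x : Int) ≥ k) (acc := [])

-- pushing Set.add through a foldl: a no-op elements already present
lemma foldl_add_filter (a : Int) :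
    ∀ (l s : List Int), a ∈ s →
      l.foldl PySem.Set.add s = (l.filter (fun x => x != a)).foldl PySem.Set.add s := by
  intro l
  induction l with
  | nil => intro s _; rfl
  | cons x tl ih =>
    intro s hs
    by_cases hx : x = a
    · subst hx
      simp only [List.filter_cons, bne_self_eq_false, Bool.false_eq_true, ite_false, List.foldl_cons]
      rw [PySem.Set.add_of_mem hs]
      exact ih s hs
    · simp only [List.filter_cons, bne_iff_ne, hx, ne_eq, not_false_eq_true, ite_true,
        List.foldl_cons]
      exact ih _ (by rw [PySem.Set.add_eq_ite]; split <;> simp [hs])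

lemma foldl_add_cons (a : Int) :
    ∀ (l s : List Int), a ∉ l → a ∉ s →
      l.foldl PySem.Set.add (a :: s) = a :: l.foldl PySem.Set.add s := by
  intro l
  induction l with
  | nil => intro s _ _; rfl
  | cons x tl ih =>
    intro s hl hs
    have hxa : x ≠ a := fun h => hl (by simp [h])
    have hmem : x ∈ a :: s ↔ x ∈ s := by simp [hxa]
    simp only [List.foldl_cons]
    rw [PySem.Set.add_eq_ite, PySem.Set.add_eq_ite (s := s)]
    by_cases hx : x ∈ s
    · simp only [hmem.mpr hx |> fun h => h, hx, ite_true]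
      · exact ih s (fun h => hl (List.mem_cons_of_mem _ h)) hs
    · have : x ∉ a :: s := fun h => hx (hmem.mp h)
      simp only [this, hx, ite_false]
      rw [show (a :: s) ++ [x] = a :: (s ++ [x]) by simp]
      exact ih (s ++ [x]) (fun h => hl (List.mem_cons_of_mem _ h))
        (by simp [hs, Ne.symm hxa])

lemma ofList_cons_partition (a : Int) (tl : List Int) :
    PySem.Set.ofList (a :: tl)
      = a :: PySem.Set.ofList (tl.filter (fun x => x != a)) := by
  have h0 : PySem.Set.ofList (a :: tl) = tl.foldl PySem.Set.add [a] := by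
    rw [PySem.Set.ofList_eq_foldl]; rfl
  rw [h0, foldl_add_filter a tl [a] (by simp)]
  exact foldl_add_cons a _ [] (by simp) (by simp)

lemma count_filter_ne (a x : Int) (hx : x ≠ a) (l : List Int) :
    (l.filter (fun y => y != a)).count x = l.count x := by
  induction l with
  | nil => rfl
  | cons y tl ih =>
    by_cases hy : y = a
    · subst hy
      simp [Ne.symm hx, ih]
    · simp [hy, List.count_cons, ih]

-- B's loop equals the same filter (appended to the accumulator), by strong induction on the length.
lemma loop_eq_filter (k : Int) (nums res : List Int) :
    tkAltLoop k nums res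
      = res ++ (PySem.Set.ofList nums).filter (fun x => decide ((nums.count x : Int) ≥ k)) := by
  induction hn : nums.length using Nat.strong_induction_on generalizing nums res with
  | _ n ih =>
  match nums with
  | [] => simp [tkAltLoop]
  | a :: tl =>
    have hrest : (tl.filter (fun x => x != a)).length < n := by
      subst hn
      simpa using Nat.lt_succ_of_le (List.length_filter_le _ _)
    rw [tkAltLoop]
    rw [ih _ hrest (tl.filter (fun x => x != a)) _ rfl]
    rw [ofList_cons_partition a tl]
    have hcnt : (((a :: tl).length : Int) - ((tl.filter (fun x => x != a)).length : Int))
        = ((a :: tl).count a : Int) := by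
      have h1 : tl.length = (tl.filter (fun y => y != a)).length + tl.count a := by
        rw [← List.countP_eq_length_filter, List.count, List.length_eq_countP_add_countP (p := fun y => y != a)]
        congr 1
        apply List.countP_congr
        intro y _
        by_cases h : y = a <;> simp [h]
      simp only [List.length_cons, List.count_cons_self]
      push_cast
      omega
    rw [List.filter_cons]
    have hfc : ((PySem.Set.ofList (tl.filter (fun x => x != a))).filter
          (fun x => decide (((tl.filter (fun y => y != a)).count x : Int) ≥ k)))
        = ((PySem.Set.ofList (tl.filter (fun x => x != a))).filter
          (fun x => decide (((a :: tl).count x : Int) ≥ k))) := by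
      apply List.filter_congr
      intro x hx
      have hx' : x ∈ tl.filter (fun y => y != a) := by
        have := PySem.Set.mem_ofList (xs := tl.filter (fun y => y != a)) (y := x)
        exact this.mp hx
      have hxa : x ≠ a := by
        have := List.of_mem_filter hx'
        simpa using this
      rw [count_filter_ne a x hxa tl]
      simp [Ne.symm hxa]  -- count unchanged when head differs
    rw [hfc, hcnt]
    split <;> rename_i h <;> simp at h <;> simp [h]

lemma b_eq_filter (nums : List Int) (k : Int) :
    top_k_frequent_elements_alt nums k
      = (PySem.Set.ofList nums).filter (fun x => decide ((nums.count x : Int) ≥ k)) := by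
  simpa using loop_eq_filter k nums []

-- ===== VERDICT =====
theorem top_k_frequent_elements_spec : Claim_equal_top_k_frequent_elements := by
  intro nums k _
  rw [Spec_top_k_frequent_elements, a_eq_filter, b_eq_filter]
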